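-- pv_equiv track=rewrite | github.com/PothpothBR/all-others | repository/projetos/python/roguegame/backup4-2/data.py | getvals
-- ===== SOURCE A (Python) =====
-- def getvals(data: str):
--     buffer = ''
--     sec_buffer = ''
--     c = 0
--     while c < len(data):
--         if data[c] == '\n': break
--         buffer += data[c]
--         if data[c] == ':':
--             sec_buffer = buffer
--             buffer = ''
--         c += 1
--     return tuple((sec_buffer, buffer))
-- ===== SOURCE B (Python) =====
-- def getvals(data: str):
--     line = data.split('\n')[0]
--     parts = line.split(':')
--     buffer = parts[-1]
--     sec_buffer = parts[-2] + ':' if len(parts) > 1 else ''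
--     return (sec_buffer, buffer)
-- ===== Notes on version B (the rewrite author's own statement) =====
-- stated objective: simpler
-- what changed: Replaces the char-by-char index scan with stateful buffer/sec_buffer string accumulation by taking the first line with a newline split and a colon split of that line, reading off the last one or two segments.
import Mathlib
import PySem

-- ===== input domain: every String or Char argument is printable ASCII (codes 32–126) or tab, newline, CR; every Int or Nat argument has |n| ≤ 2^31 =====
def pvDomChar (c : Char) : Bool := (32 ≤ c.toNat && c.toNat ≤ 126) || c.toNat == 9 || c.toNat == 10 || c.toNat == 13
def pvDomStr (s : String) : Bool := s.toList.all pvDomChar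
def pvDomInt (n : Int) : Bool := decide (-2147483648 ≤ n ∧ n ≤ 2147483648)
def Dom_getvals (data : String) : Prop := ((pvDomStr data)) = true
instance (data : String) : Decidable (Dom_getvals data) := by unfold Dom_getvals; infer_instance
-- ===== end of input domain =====

-- B replaces A's char-by-char stateful scan with 'take the first line, split it on colons,
-- pick the last two segments' (objective: simpler decomposition; same return value).

-- ===== PORT A =====
-- A's while-loop: index scan with buffer/sec_buffer state, break at '\n';
-- ported as the obvious structural recursion over the remaining characters with the same state.
def getvalsGo : List Char → List Char → List Char → List String
  | [], sec, buf => [String.ofList sec, String.ofList buf]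
  | c :: rest, sec, buf =>
    if c = '\n' then [String.ofList sec, String.ofList buf]
    else
      if c = ':' then getvalsGo rest (buf ++ [c]) [] else getvalsGo rest sec (buf ++ [c])

def getvals (data : String) : List String := getvalsGo data.toList [] []

-- ===== PORT B =====
-- data.split('\n') / line.split(':') with a nonempty literal separator = PySem.Chars.splitOn (exact);
-- split never returns an empty list, so the [0], [-1], [-2] lookups never raise and the
-- pyGetD defaults are never used.  'line' and 'parts' of Source B are the helper defs below.
def getvalsLine (data : String) : String :=
  PySem.List.pyGetD ((PySem.Chars.splitOn data.toList ['\n']).map String.ofList) 0 ""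

def getvalsParts (data : String) : List String :=
  (PySem.Chars.splitOn (getvalsLine data).toList [':']).map String.ofList

def getvals_alt (data : String) : List String :=
  [if 1 < (getvalsParts data).length then PySem.List.pyGetD (getvalsParts data) (-2) "" ++ ":" else "",
   PySem.List.pyGetD (getvalsParts data) (-1) ""]

-- ===== PRECONDITION & SPEC =====
def Spec_getvals (data : String) (out : List String) : Prop := out = getvals_alt data
instance (data : String) (out : List String) : Decidable (Spec_getvals data out) := by unfold Spec_getvals; infer_instance

-- ===== CLAIM (what is proved, stated in full; the proofs are below) =====
def Claim_equal_getvals : Prop := ∀ (data : String), Dom_getvals data → Spec_getvals data (getvals data)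

-- ===== LEMMAS AND PROOFS =====

-- A simple structural model of Python's str.split with a one-character separator.
def splitCh (sep : Char) : List Char → List Char → List (List Char)
  | [], cur => [cur]
  | c :: rest, cur => if c = sep then cur :: splitCh sep rest [] else splitCh sep rest (cur ++ [c])

-- The value A's scan produces, expressed on the colon-segments of the line.
def pick (sec : List Char) : List (List Char) → List Char × List Char
  | [] => (sec, [])
  | [b] => (sec, b)
  | [a, b] => (a ++ [':'], b)
  | _ :: b :: c :: rest => pick sec (b :: c :: rest)

theorem splitOn_go_eq_splitCh (sep : Char) :
    ∀ (l : List Char) (fuel : Nat), l.length ≤ fuel → ∀ (cur : List Char) (acc : List (List Char)),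
      PySem.Chars.splitOn.go [sep] fuel l cur acc = acc.reverse ++ splitCh sep l cur.reverse := by
  intro l
  induction l with
  | nil =>
      intro fuel _ cur acc
      cases fuel <;> simp [PySem.Chars.splitOn.go, splitCh]
  | cons c rest ih =>
      intro fuel hf cur acc
      cases fuel with
      | zero => simp at hf
      | succ f =>
          have hf' : rest.length ≤ f := by simpa using hf
          by_cases hc : c = sep
          · rw [show PySem.Chars.splitOn.go [sep] (f + 1) (c :: rest) cur acc
                = PySem.Chars.splitOn.go [sep] f rest [] (cur.reverse :: acc) by
              simp [PySem.Chars.splitOn.go, List.isPrefixOf, hc]]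
            rw [ih f hf' [] (cur.reverse :: acc)]
            simp [splitCh, hc]
          · rw [show PySem.Chars.splitOn.go [sep] (f + 1) (c :: rest) cur acc
                = PySem.Chars.splitOn.go [sep] f rest (c :: cur) acc by
              simp [PySem.Chars.splitOn.go, List.isPrefixOf, Ne.symm hc]]
            rw [ih f hf' (c :: cur) acc]
            simp [splitCh, hc]

theorem splitOn_eq_splitCh (sep : Char) (l : List Char) :
    PySem.Chars.splitOn l [sep] = splitCh sep l [] := by
  have := splitOn_go_eq_splitCh sep l (l.length + 1) (by omega) [] []
  simpa [PySem.Chars.splitOn] using this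

theorem splitCh_head (sep : Char) :
    ∀ (l cur : List Char), ∃ t, splitCh sep l cur = (cur ++ l.takeWhile (· ≠ sep)) :: t := by
  intro l
  induction l with
  | nil => intro cur; exact ⟨[], by simp [splitCh]⟩
  | cons c rest ih =>
      intro cur
      by_cases hc : c = sep
      · exact ⟨splitCh sep rest [], by simp [splitCh, hc]⟩
      · obtain ⟨t, ht⟩ := ih (cur ++ [c])
        exact ⟨t, by simp [splitCh, hc, ht]⟩

theorem splitCh_ne_nil (sep : Char) (l cur : List Char) : splitCh sep l cur ≠ [] := by
  obtain ⟨t, ht⟩ := splitCh_head sep l cur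
  simp [ht]

theorem pick_indep : ∀ (ps : List (List Char)), 2 ≤ ps.length →
    ∀ (s1 s2 : List Char), pick s1 ps = pick s2 ps := by
  intro ps
  induction ps with
  | nil => intro h; simp at h
  | cons a t ih =>
      intro h s1 s2
      match t with
      | [] => simp at h
      | [b] => simp [pick]
      | b :: c :: rest => simpa [pick] using ih (by simp) s1 s2

theorem pick_cons (sec buf : List Char) (ps : List (List Char)) (h : ps ≠ []) :
    pick sec (buf :: ps) = pick (buf ++ [':']) ps := by
  match ps with
  | [] => exact absurd rfl h
  | [b] => simp [pick]
  | b :: c :: rest => exact pick_indep (b :: c :: rest) (by simp) sec (buf ++ [':'])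

theorem scan_takeWhile : ∀ (cs sec buf : List Char),
    getvalsGo cs sec buf = getvalsGo (cs.takeWhile (· ≠ '\n')) sec buf := by
  intro cs
  induction cs with
  | nil => intro sec buf; rfl
  | cons c rest ih =>
      intro sec buf
      by_cases hc : c = '\n'
      · subst hc; simp [getvalsGo]
      · by_cases hcol : c = ':'
        · subst hcol
          simp [getvalsGo, hc, ih]
        · simp [getvalsGo, hc, hcol, ih]

theorem scan_eq_pick : ∀ (l : List Char), '\n' ∉ l → ∀ (sec buf : List Char),
    getvalsGo l sec buf =
      [String.ofList (pick sec (splitCh ':' l buf)).1,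
       String.ofList (pick sec (splitCh ':' l buf)).2] := by
  intro l
  induction l with
  | nil => intro _ sec buf; simp [getvalsGo, splitCh, pick]
  | cons c rest ih =>
      intro hnl sec buf
      have hc : c ≠ '\n' := by intro h; exact hnl (by simp [h])
      have hrest : '\n' ∉ rest := by intro h; exact hnl (by simp [h])
      by_cases hcol : c = ':'
      · subst hcol
        rw [show getvalsGo (':' :: rest) sec buf = getvalsGo rest (buf ++ [':']) [] by
          simp [getvalsGo, hc]]
        rw [ih hrest (buf ++ [':']) []]
        have hsp : splitCh ':' (':' :: rest) buf = buf :: splitCh ':' rest [] := by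
          simp [splitCh]
        rw [hsp, pick_cons sec buf _ (splitCh_ne_nil ':' rest [])]
      · rw [show getvalsGo (c :: rest) sec buf = getvalsGo rest sec (buf ++ [c]) by
          simp [getvalsGo, hc, hcol]]
        rw [ih hrest sec (buf ++ [c])]
        have hsp : splitCh ':' (c :: rest) buf = splitCh ':' rest (buf ++ [c]) := by
          simp [splitCh, hcol]
        rw [hsp]

theorem pyGet?_map {α β : Type} (f : α → β) (xs : List α) (i : Int) :
    PySem.List.pyGet? (xs.map f) i = (PySem.List.pyGet? xs i).map f := by
  simp [PySem.List.pyGet?]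

theorem pyGet?_neg_one {α : Type} (xs : List α) :
    PySem.List.pyGet? xs (-1) = xs.getLast? := by
  cases xs with
  | nil => simp [PySem.List.pyGet?, PySem.List.pyIdx?]
  | cons a t =>
      have h1 : PySem.List.pyIdx? (t.length + 1) (-1) = some t.length := by
        simp [PySem.List.pyIdx?]
      simp [PySem.List.pyGet?, h1, List.getLast?_eq_getElem?]

theorem pyGet?_neg_two {α : Type} (xs : List α) (h : 2 ≤ xs.length) :
    PySem.List.pyGet? xs (-2) = xs[xs.length - 2]? := by
  have h1 : PySem.List.pyIdx? xs.length (-2) = some (xs.length - 2) := by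
    simp [PySem.List.pyIdx?]
    omega
  simp [PySem.List.pyGet?, h1]

theorem pick_snd : ∀ (ps : List (List Char)), ps ≠ [] → ∀ (sec : List Char),
    some (pick sec ps).2 = ps.getLast? := by
  intro ps
  induction ps with
  | nil => intro h; exact absurd rfl h
  | cons a t ih =>
      intro _ sec
      match t with
      | [] => simp [pick]
      | [b] => simp [pick]
      | b :: c :: rest =>
          rw [show pick sec (a :: b :: c :: rest) = pick sec (b :: c :: rest) from rfl]
          rw [ih (by simp) sec]
          simp [List.getLast?_cons_cons]

theorem pick_fst : ∀ (ps : List (List Char)), 2 ≤ ps.length → ∀ (sec : List Char),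
    some (pick sec ps).1 = (ps[ps.length - 2]?).map (· ++ [':']) := by
  intro ps
  induction ps with
  | nil => intro h; simp at h
  | cons a t ih =>
      intro h sec
      match t with
      | [] => simp at h
      | [b] => simp [pick]
      | b :: c :: rest =>
          rw [show pick sec (a :: b :: c :: rest) = pick sec (b :: c :: rest) from rfl]
          rw [ih (by simp) sec]
          have hlen : (a :: b :: c :: rest).length - 2 = ((b :: c :: rest).length - 2) + 1 := by
            simp
          rw [hlen, List.getElem?_cons_succ]

theorem getvals_alt_eq_pick (data : String) :
    getvals_alt data =
      [String.ofList (pick [] (splitCh ':' (data.toList.takeWhile (· ≠ '\n')) [])).1,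
       String.ofList (pick [] (splitCh ':' (data.toList.takeWhile (· ≠ '\n')) [])).2] := by
  obtain ⟨t, ht⟩ := splitCh_head '\n' data.toList []
  have hline : getvalsLine data = String.ofList (data.toList.takeWhile (· ≠ '\n')) := by
    unfold getvalsLine
    rw [splitOn_eq_splitCh, ht]
    simp [PySem.List.pyGetD, PySem.List.pyGet?, PySem.List.pyIdx?]
  set l : List Char := data.toList.takeWhile (· ≠ '\n') with hl
  set ps : List (List Char) := splitCh ':' l [] with hps
  have hne : ps ≠ [] := splitCh_ne_nil ':' l []
  have hparts : getvalsParts data = ps.map String.ofList := by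
    unfold getvalsParts
    rw [hline]
    simp [splitOn_eq_splitCh, hps]
  have hbuf : PySem.List.pyGetD (ps.map String.ofList) (-1) ""
      = String.ofList (pick [] ps).2 := by
    rw [PySem.List.pyGetD, pyGet?_map, pyGet?_neg_one, ← pick_snd ps hne []]
    rfl
  unfold getvals_alt
  rw [hparts, hbuf]
  by_cases hlen : 1 < (ps.map String.ofList).length
  · have hlen2 : 2 ≤ ps.length := by simpa using hlen
    have hsec : PySem.List.pyGetD (ps.map String.ofList) (-2) "" ++ ":"
        = String.ofList (pick [] ps).1 := by
      rw [PySem.List.pyGetD, pyGet?_map, pyGet?_neg_two _ (by simpa using hlen2)]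
      obtain ⟨v, hv⟩ : ∃ v, ps[ps.length - 2]? = some v :=
        ⟨ps[ps.length - 2]'(by omega), List.getElem?_eq_getElem (by omega)⟩
      have h1 := pick_fst ps hlen2 []
      rw [hv] at h1
      simp only [Option.map_some, Option.some.injEq] at h1
      simp [hv, h1]
    simp only [hlen, if_true]
    rw [hsec]
  · have hlen1 : ps.length = 1 := by
      have hpos := List.length_pos_of_ne_nil hne
      simp at hlen
      omega
    obtain ⟨b, hb⟩ : ∃ b, ps = [b] := by
      match ps, hlen1 with
      | [b], _ => exact ⟨b, rfl⟩
    simp only [hlen, if_false]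
    rw [hb]
    simp [pick]

-- ===== VERDICT (by name: the statement is the Claim_ definition above) =====
theorem getvals_spec : Claim_equal_getvals := by
  intro data _
  unfold Spec_getvals getvals
  rw [scan_takeWhile, scan_eq_pick _ (by
    intro h
    have := List.mem_takeWhile_imp h
    simp at this) [] [], getvals_alt_eq_pick]
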